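-- pv_equiv track=rewrite | github.com/kshipra-jadav/face_detection_flask | app.py | get_unique_face_locations
-- ===== SOURCE A (Python) =====
-- def get_unique_face_locations(all_face_locations):
--     unique_detected_faces = []
--     for (x1, y1, w1, h1) in all_face_locations:
--         unique = True
--         for (x2, y2, w2, h2) in unique_detected_faces:
--             if abs(x1 - x2) < 50 and abs(y1 - y2) < 50:
--                 unique = False
--                 break
--         if unique:
--             unique_detected_faces.append((x1, y1, w1, h1))
--
--     return unique_detected_faces
-- ===== SOURCE B (Python) =====
-- def get_unique_face_locations(all_face_locations):
--     result = []
--     cells = {}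
--     for (x1, y1, w1, h1) in all_face_locations:
--         cx, cy = x1 // 50, y1 // 50
--         clash = False
--         for dx in (-1, 0, 1):
--             for dy in (-1, 0, 1):
--                 for (x2, y2, w2, h2) in cells.get((cx + dx, cy + dy), ()):
--                     if abs(x1 - x2) < 50 and abs(y1 - y2) < 50:
--                         clash = True
--                         break
--                 if clash:
--                     break
--             if clash:
--                 break
--         if not clash:
--             result.append((x1, y1, w1, h1))
--             cells.setdefault((cx, cy), []).append((x1, y1, w1, h1))
--     return result
-- ===== Notes on version B (the rewrite author's own statement) =====
-- stated objective: faster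
-- what changed: Replaces the inner linear scan over all accepted faces with a spatial hash: a dict maps grid cell (x//50, y//50) to accepted faces in it, and each new face is tested only against faces in the 3x3 neighboring cells, still with the exact abs<50 test.
import Mathlib
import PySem

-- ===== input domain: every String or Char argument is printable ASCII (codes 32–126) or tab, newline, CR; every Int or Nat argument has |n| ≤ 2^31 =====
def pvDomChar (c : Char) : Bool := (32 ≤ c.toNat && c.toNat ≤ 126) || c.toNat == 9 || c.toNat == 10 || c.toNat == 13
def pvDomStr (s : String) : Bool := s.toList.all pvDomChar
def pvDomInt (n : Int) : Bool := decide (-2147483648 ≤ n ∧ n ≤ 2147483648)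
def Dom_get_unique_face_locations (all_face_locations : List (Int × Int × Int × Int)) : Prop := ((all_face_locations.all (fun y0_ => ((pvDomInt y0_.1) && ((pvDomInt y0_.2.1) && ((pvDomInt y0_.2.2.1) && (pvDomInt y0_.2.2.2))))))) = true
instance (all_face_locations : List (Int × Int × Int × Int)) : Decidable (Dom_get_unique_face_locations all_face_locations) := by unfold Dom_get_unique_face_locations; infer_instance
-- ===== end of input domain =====

-- B replaces A's inner scan over all accepted faces with a spatial-hash dict keyed by grid cell
-- (x//50, y//50), testing a new face only against the 3x3 neighboring cells (objective: faster).

-- ===== PORT A =====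
-- the inner 'for … if abs(...)<50 and abs(...)<50: unique=False; break' loop of A
def pvClashScan (f : Int × Int × Int × Int) : List (Int × Int × Int × Int) → Bool
  | [] => false
  | g :: rest =>
      if (f.1 - g.1).natAbs < 50 ∧ (f.2.1 - g.2.1).natAbs < 50 then true
      else pvClashScan f rest

def get_unique_face_locations (all_face_locations : List (Int × Int × Int × Int)) : List (Int × Int × Int × Int) :=
  all_face_locations.foldl
    (fun unique_detected_faces f =>
      if pvClashScan f unique_detected_faces then unique_detected_faces
      else unique_detected_faces ++ [f])
    []

-- ===== PORT B =====
-- the 9 (dx, dy) offsets in B's loop order (dx outer, dy inner)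
def pvOffs : List (Int × Int) :=
  [(-1,-1),(-1,0),(-1,1),(0,-1),(0,0),(0,1),(1,-1),(1,0),(1,1)]

-- grid cell of a face
def pvKey (f : Int × Int × Int × Int) : Int × Int :=
  (PySem.Int.floordiv f.1 50, PySem.Int.floordiv f.2.1 50)

-- B's neighbor-cell clash test: scan (with break) each of the 9 buckets
def pvClashCells (f : Int × Int × Int × Int)
    (cells : PySem.Dict (Int × Int) (List (Int × Int × Int × Int))) : Bool :=
  pvOffs.any (fun o =>
    pvClashScan f (cells.getD ((pvKey f).1 + o.1, (pvKey f).2 + o.2) []))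

def pvGoB : List (Int × Int × Int × Int) → List (Int × Int × Int × Int) →
    PySem.Dict (Int × Int) (List (Int × Int × Int × Int)) → List (Int × Int × Int × Int)
  | [], result, _ => result
  | f :: rest, result, cells =>
      if pvClashCells f cells then pvGoB rest result cells
      else pvGoB rest (result ++ [f])
            (cells.insert (pvKey f) (cells.getD (pvKey f) [] ++ [f]))

def get_unique_face_locations_alt (all_face_locations : List (Int × Int × Int × Int)) : List (Int × Int × Int × Int) :=
  pvGoB all_face_locations [] PySem.Dict.empty

-- ===== PRECONDITION & SPEC =====
def Spec_get_unique_face_locations (all_face_locations : List (Int × Int × Int × Int)) (out : List (Int × Int × Int × Int)) : Prop := out = get_unique_face_locations_alt all_face_locations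
instance (all_face_locations : List (Int × Int × Int × Int)) (out : List (Int × Int × Int × Int)) : Decidable (Spec_get_unique_face_locations all_face_locations out) := by unfold Spec_get_unique_face_locations; infer_instance

-- ===== CLAIM (what is proved, stated in full; the proofs are below) =====
def Claim_equal_get_unique_face_locations : Prop := ∀ (all_face_locations : List (Int × Int × Int × Int)), Dom_get_unique_face_locations all_face_locations → Spec_get_unique_face_locations all_face_locations (get_unique_face_locations all_face_locations)

-- ===== LEMMAS AND PROOFS =====

def pvNear (f g : Int × Int × Int × Int) : Bool :=
  decide ((f.1 - g.1).natAbs < 50 ∧ (f.2.1 - g.2.1).natAbs < 50)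

theorem pvClashScan_eq_any (f : Int × Int × Int × Int) (l : List (Int × Int × Int × Int)) :
    pvClashScan f l = l.any (pvNear f) := by
  induction l with
  | nil => rfl
  | cons g rest ih =>
      simp only [pvClashScan, pvNear, List.any_cons]
      split_ifs with h <;> simp [h, ih]

-- close faces live in neighboring cells
theorem pvNear_key (f g : Int × Int × Int × Int) (h : pvNear f g = true) :
    ((pvKey g).1 - (pvKey f).1, (pvKey g).2 - (pvKey f).2) ∈ pvOffs := by
  simp only [pvNear, decide_eq_true_eq] at h
  have hx := h.1
  have hy := h.2
  simp only [pvKey]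
  rw [PySem.Int.floordiv_eq_ediv_of_pos (a := f.1) (by norm_num),
      PySem.Int.floordiv_eq_ediv_of_pos (a := g.1) (by norm_num),
      PySem.Int.floordiv_eq_ediv_of_pos (a := f.2.1) (by norm_num),
      PySem.Int.floordiv_eq_ediv_of_pos (a := g.2.1) (by norm_num)]
  have hx' : g.1 / 50 - f.1 / 50 = -1 ∨ g.1 / 50 - f.1 / 50 = 0 ∨ g.1 / 50 - f.1 / 50 = 1 := by omega
  have hy' : g.2.1 / 50 - f.2.1 / 50 = -1 ∨ g.2.1 / 50 - f.2.1 / 50 = 0 ∨ g.2.1 / 50 - f.2.1 / 50 = 1 := by omega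
  simp only [pvOffs, List.mem_cons, Prod.mk.injEq]
  rcases hx' with h1 | h1 | h1 <;> rcases hy' with h2 | h2 | h2 <;> simp [h1, h2]

-- the bucket invariant: each cell holds exactly the accepted faces of that cell, in order
def pvInv (result : List (Int × Int × Int × Int))
    (cells : PySem.Dict (Int × Int) (List (Int × Int × Int × Int))) : Prop :=
  ∀ k, cells.getD k [] = result.filter (fun g => pvKey g = k)

theorem pvClashCells_eq (f : Int × Int × Int × Int) (result : List (Int × Int × Int × Int))
    (cells : PySem.Dict (Int × Int) (List (Int × Int × Int × Int)))
    (hinv : pvInv result cells) :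
    pvClashCells f cells = pvClashScan f result := by
  rw [pvClashScan_eq_any, Bool.eq_iff_iff]
  simp only [pvClashCells, pvClashScan_eq_any, List.any_eq_true]
  constructor
  · rintro ⟨o, _, g, hg, hn⟩
    rw [hinv] at hg
    exact ⟨g, (List.mem_filter.mp hg).1, hn⟩
  · rintro ⟨g, hg, hn⟩
    refine ⟨((pvKey g).1 - (pvKey f).1, (pvKey g).2 - (pvKey f).2), pvNear_key f g hn, g, ?_, hn⟩
    rw [hinv, List.mem_filter]
    refine ⟨hg, ?_⟩
    simp only [decide_eq_true_eq, Prod.ext_iff]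
    constructor <;> [omega; omega]

theorem pvInv_step (f : Int × Int × Int × Int) (result : List (Int × Int × Int × Int))
    (cells : PySem.Dict (Int × Int) (List (Int × Int × Int × Int)))
    (hinv : pvInv result cells) :
    pvInv (result ++ [f]) (cells.insert (pvKey f) (cells.getD (pvKey f) [] ++ [f])) := by
  intro k
  rw [PySem.Dict.getD_insert]
  by_cases hk : k = pvKey f
  · subst hk
    rw [if_pos rfl, hinv, List.filter_append]
    simp
  · have hne : pvKey f ≠ k := fun h => hk h.symm
    rw [if_neg hk, hinv k, List.filter_append]
    simp [hne]

theorem pvGoB_eq (l result : List (Int × Int × Int × Int))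
    (cells : PySem.Dict (Int × Int) (List (Int × Int × Int × Int)))
    (hinv : pvInv result cells) :
    pvGoB l result cells =
      l.foldl (fun acc f => if pvClashScan f acc then acc else acc ++ [f]) result := by
  induction l generalizing result cells with
  | nil => rfl
  | cons f rest ih =>
      simp only [pvGoB, List.foldl_cons, pvClashCells_eq f result cells hinv]
      by_cases h : pvClashScan f result = true
      · simp only [h, if_true]
        exact ih result cells hinv
      · simp only [h, if_false, Bool.false_eq_true]
        exact ih _ _ (pvInv_step f result cells hinv)

-- ===== VERDICT (by name: the statement is the Claim_ definition above) =====
theorem get_unique_face_locations_spec : Claim_equal_get_unique_face_locations := by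
  intro l _
  unfold Spec_get_unique_face_locations get_unique_face_locations get_unique_face_locations_alt
  rw [pvGoB_eq]
  intro k
  simp [PySem.Dict.getD_empty]
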